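-- pv_equiv track=rewrite | github.com/BlakeSHerrera/Standalones | codingbat_converter/codingbat_converter.py | format_all_inputs
-- ===== SOURCE A (Python) =====
-- def format_all_inputs(inputs):
--     if inputs[0] == '':
--         del inputs[0]
--     ins = []
--     for i in inputs[:-1]:
--         s = ''
--         in_bracket = False
--         count = 0
--         for j in i:
--             if j == '[':
--                 j = '{'
--                 s += '(int[])'
--                 in_bracket = True
--             elif j == ']':
--                 j = '}'
--                 in_bracket = False
--                 s += j
--                 s += ', ' + str(count + 1)
--                 count = 0
--                 continue
--             elif j == ',' and in_bracket:
--                 count += 1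
--             s += j
--         ins.append(s)
--     i = inputs[-1]
--     s = ''
--     in_bracket = False
--     count = 0
--     for j in i:
--         if j == '[':
--             j = '{'
--             s += 'ialloc((int[])'
--             in_bracket = True
--         elif j == ']':
--             j = '}'
--             in_bracket = False
--             s += j + ')'
--             s += ', ' + str(count + 1)
--             count = 0
--             continue
--         elif j == ',' and in_bracket:
--             count += 1
--         s += j
--     ins.append(s)
--     return replace(', '.join(i for i in ins))
--
-- def replace(s):
--     s = s.replace('true', 'TRUE')
--     s = s.replace('false', 'FALSE')
--     s = s.replace('boolean', 'int')
--     s = s.replace('String', 'char *')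
--     s = s.replace('"', '\\"')
--     s = s.replace('null', 'NULL')
--     return s
-- ===== SOURCE B (Python) =====
-- def replace(s):
--     s = s.replace('true', 'TRUE')
--     s = s.replace('false', 'FALSE')
--     s = s.replace('boolean', 'int')
--     s = s.replace('String', 'char *')
--     s = s.replace('"', '\\"')
--     s = s.replace('null', 'NULL')
--     return s
--
--
-- def _convert(s, prefix, close):
--     # split on ']' instead of a per-character state machine: each piece before a
--     # ']' is one bracket group; commas after its first '[' give the element count
--     parts = s.split(']')
--     out = []
--     for part in parts[:-1]:
--         b = part.find('[')
--         commas = part[b + 1:].count(',') if b != -1 else 0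
--         out.append(part.replace('[', prefix + '{') + '}' + close
--                    + ', ' + str(commas + 1))
--     out.append(parts[-1].replace('[', prefix + '{'))
--     return ''.join(out)
--
--
-- def format_all_inputs(inputs):
--     if inputs[0] == '':
--         del inputs[0]
--     ins = [_convert(s, '(int[])', '') for s in inputs[:-1]]
--     ins.append(_convert(inputs[-1], 'ialloc((int[])', ')'))
--     return replace(', '.join(ins))
-- ===== Notes on version B (the rewrite author's own statement) =====
-- stated objective: idiomatic
-- what changed: Replaces A's per-character state machine (in_bracket flag + running comma counter) by a split-on-']' pass: each piece before a ']' is one bracket group, translated with str.replace('[', prefix+'{') and its element count computed as commas-after-first-'[' + 1 via find/slice/count.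
-- outside the precondition, e.g. on format_all_inputs([]): A raises IndexError, B raises IndexError; on format_all_inputs(['']): A raises IndexError, B raises IndexError
import Mathlib
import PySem

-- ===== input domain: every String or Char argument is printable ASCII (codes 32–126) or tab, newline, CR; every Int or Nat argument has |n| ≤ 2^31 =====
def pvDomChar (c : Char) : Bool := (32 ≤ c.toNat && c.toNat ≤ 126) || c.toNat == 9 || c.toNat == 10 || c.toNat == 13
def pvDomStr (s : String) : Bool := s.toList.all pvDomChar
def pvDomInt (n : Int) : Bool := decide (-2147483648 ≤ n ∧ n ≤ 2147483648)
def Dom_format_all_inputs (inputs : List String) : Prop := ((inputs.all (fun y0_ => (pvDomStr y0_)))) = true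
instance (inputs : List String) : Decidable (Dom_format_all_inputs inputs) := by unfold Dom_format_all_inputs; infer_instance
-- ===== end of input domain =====

-- B replaces A's per-character bracket state machine by a split-on-']' pass (replace/find/count
-- per segment); objective: idiomatic/alternative. Both A and B delete inputs[0] in place when it
-- is '' — the equivalence proved here is about the return value only (B performs the same mutation).

-- ===== PORT A =====
-- the shared six-step replace chain (helper `replace` in the module, identical in A and B)
def pvReplaceChain (s : String) : String :=
  let s := PySem.Str.replace s "true" "TRUE"
  let s := PySem.Str.replace s "false" "FALSE"
  let s := PySem.Str.replace s "boolean" "int"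
  let s := PySem.Str.replace s "String" "char *"
  let s := PySem.Str.replace s "\"" "\\\""
  let s := PySem.Str.replace s "null" "NULL"
  s

-- one step of A's inner loop over the characters of a non-last input (state s, in_bracket, count)
def pvStepMid (st : List Char × Bool × Int) (j : Char) : List Char × Bool × Int :=
  if j = '[' then (st.1 ++ "(int[])".toList ++ ['{'], true, st.2.2)
  else if j = ']' then (st.1 ++ ['}'] ++ ", ".toList ++ PySem.Int.toChars (st.2.2 + 1), false, 0)
  else if j = ',' ∧ st.2.1 = true then (st.1 ++ [j], st.2.1, st.2.2 + 1)
  else (st.1 ++ [j], st.2.1, st.2.2)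

-- one step of A's second loop (the last input: 'ialloc((int[])' prefix, '})' close)
def pvStepLast (st : List Char × Bool × Int) (j : Char) : List Char × Bool × Int :=
  if j = '[' then (st.1 ++ "ialloc((int[])".toList ++ ['{'], true, st.2.2)
  else if j = ']' then (st.1 ++ ['}'] ++ [')'] ++ ", ".toList ++ PySem.Int.toChars (st.2.2 + 1), false, 0)
  else if j = ',' ∧ st.2.1 = true then (st.1 ++ [j], st.2.1, st.2.2 + 1)
  else (st.1 ++ [j], st.2.1, st.2.2)

def format_all_inputs (inputs : List String) : String :=
  let inputs := if PySem.List.pyGet? inputs 0 = some "" then inputs.drop 1 else inputs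
  let ins := (PySem.List.slice inputs none (some (-1))).foldl
      (fun acc i => acc ++ [String.ofList (i.toList.foldl pvStepMid ([], false, 0)).1]) ([] : List String)
  let i := (PySem.List.pyGet? inputs (-1)).getD ""   -- none only outside Pre_ (Python raises IndexError)
  let ins := ins ++ [String.ofList (i.toList.foldl pvStepLast ([], false, 0)).1]
  pvReplaceChain (PySem.Str.join ", " ins)

-- ===== PORT B =====
-- B's _convert: split on ']', handle each completed bracket group by replace/find/count
def pvConvert (pre close : List Char) (s : List Char) : List Char :=
  let parts := PySem.Chars.splitOn s [']']
  let out := (PySem.List.slice parts none (some (-1))).foldl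
      (fun acc part =>
        let b := PySem.Chars.find part ['[']
        let commas : Nat := if b ≠ -1 then PySem.Chars.count (PySem.Chars.slice part (some (b + 1)) none) [','] else 0
        acc ++ [PySem.Chars.replace part ['['] (pre ++ ['{']) ++ ['}'] ++ close ++ ", ".toList
                 ++ PySem.Int.toChars ((commas : Int) + 1)]) ([] : List (List Char))
  let out := out ++ [PySem.Chars.replace ((PySem.List.pyGet? parts (-1)).getD []) ['['] (pre ++ ['{'])]
  PySem.Chars.join [] out

def format_all_inputs_alt (inputs : List String) : String :=
  let inputs := if PySem.List.pyGet? inputs 0 = some "" then inputs.drop 1 else inputs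
  let ins := (PySem.List.slice inputs none (some (-1))).map
      (fun s => String.ofList (pvConvert "(int[])".toList [] s.toList))
  let ins := ins ++ [String.ofList (pvConvert "ialloc((int[])".toList [')']
      ((PySem.List.pyGet? inputs (-1)).getD "").toList)]
  pvReplaceChain (PySem.Str.join ", " ins)

-- ===== PRECONDITION & SPEC =====
-- Pre_ excludes [] and [''] only: there Python A (and B) raises IndexError (inputs[0] / inputs[-1]).
def Pre_format_all_inputs (inputs : List String) : Prop := inputs ≠ [] ∧ inputs ≠ [""]
instance (inputs : List String) : Decidable (Pre_format_all_inputs inputs) := by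
  unfold Pre_format_all_inputs; infer_instance
def pvWitness_format_all_inputs : List String := ["[1, 2]", "3"]

def Spec_format_all_inputs (inputs : List String) (out : String) : Prop := out = format_all_inputs_alt inputs
instance (inputs : List String) (out : String) : Decidable (Spec_format_all_inputs inputs out) := by unfold Spec_format_all_inputs; infer_instance

-- ===== CLAIM (what is proved, stated in full; the proofs are below) =====
def Claim_equal_format_all_inputs : Prop := ∀ (inputs : List String), Dom_format_all_inputs inputs → Pre_format_all_inputs inputs → Spec_format_all_inputs inputs (format_all_inputs inputs)

-- ===== LEMMAS AND PROOFS =====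

-- reference: the segments of a char list cut at every ']' (what str.split(']') returns)
def pvSegs : List Char → List (List Char)
  | [] => [[]]
  | x :: t =>
    if x = ']' then [] :: pvSegs t
    else
      match pvSegs t with
      | [] => [[x]]
      | h :: r => (x :: h) :: r

-- reference: the machine's per-character output, written as a recursion (pre = '[' prefix, close after '}')
def pvBody (pre close : List Char) : List Char → Bool → Int → List Char
  | [], _, _ => []
  | j :: t, inb, k =>
    if j = '[' then pre ++ ['{'] ++ pvBody pre close t true k
    else if j = ']' then ['}'] ++ close ++ ", ".toList ++ PySem.Int.toChars (k + 1) ++ pvBody pre close t false 0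
    else if j = ',' ∧ inb = true then [j] ++ pvBody pre close t inb (k + 1)
    else [j] ++ pvBody pre close t inb k

-- reference: per-character translation of a segment (no ']' handling)
def pvRep (pre : List Char) (l : List Char) : List Char :=
  l.flatMap (fun c => if c = '[' then pre ++ ['{'] else [c])

-- reference: the machine's comma counter inside one segment
def pvCnt : List Char → Bool → Int → Int
  | [], _, k => k
  | x :: t, inb, k =>
    if x = '[' then pvCnt t true k
    else if x = ',' ∧ inb = true then pvCnt t inb (k + 1)
    else pvCnt t inb k

-- reference: commas after the first '[' of a segment
def pvCommas : List Char → Nat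
  | [] => 0
  | x :: t => if x = '[' then t.count ',' else pvCommas t

-- reference: the whole translation on the segment list
def pvConvRef (pre close : List Char) : List (List Char) → Bool → Int → List Char
  | [], _, _ => []
  | [seg], _, _ => pvRep pre seg
  | seg :: rest, inb, k =>
      pvRep pre seg ++ ['}'] ++ close ++ ", ".toList ++ PySem.Int.toChars (pvCnt seg inb k + 1)
        ++ pvConvRef pre close rest false 0

theorem pvSegs_ne_nil (l : List Char) : pvSegs l ≠ [] := by
  cases l with
  | nil => simp [pvSegs]
  | cons x t =>
    simp only [pvSegs]
    split_ifs
    · simp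
    · cases h : pvSegs t <;> simp

theorem pv_splitOn_go (l : List Char) : ∀ (fuel : Nat) (cur : List Char) (acc : List (List Char)),
    l.length ≤ fuel →
    PySem.Chars.splitOn.go [']'] fuel l cur acc =
      acc.reverse ++ (match pvSegs l with
        | [] => []
        | h :: r => (cur.reverse ++ h) :: r) := by
  induction l with
  | nil =>
    intro fuel cur acc _
    cases fuel <;> simp [PySem.Chars.splitOn.go, pvSegs]
  | cons c t ih =>
    intro fuel cur acc hle
    cases fuel with
    | zero => simp at hle
    | succ f =>
      by_cases hc : c = ']'
      · subst hc
        have h1 : PySem.Chars.splitOn.go [']'] (f+1) (']'::t) cur acc =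
            PySem.Chars.splitOn.go [']'] f t [] (cur.reverse :: acc) := by
          simp [PySem.Chars.splitOn.go, List.isPrefixOf]
        rw [h1, ih f [] (cur.reverse :: acc) (by simpa using Nat.lt_succ_iff.mp (Nat.lt_of_lt_of_le (by simp) hle))]
        rcases hseg : pvSegs t with _ | ⟨h, r⟩
        · exact absurd hseg (pvSegs_ne_nil t)
        · simp [pvSegs, hseg]
      · have h1 : PySem.Chars.splitOn.go [']'] (f+1) (c::t) cur acc =
            PySem.Chars.splitOn.go [']'] f t (c :: cur) acc := by
          simp [PySem.Chars.splitOn.go, List.isPrefixOf]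
          intro h; exact absurd h.symm hc
        rw [h1, ih f (c :: cur) acc (by simpa using Nat.lt_succ_iff.mp (Nat.lt_of_lt_of_le (by simp) hle))]
        rcases hseg : pvSegs t with _ | ⟨h, r⟩
        · exact absurd hseg (pvSegs_ne_nil t)
        · simp [pvSegs, hc, hseg]

theorem pv_splitOn_eq (l : List Char) : PySem.Chars.splitOn l [']'] = pvSegs l := by
  have := pv_splitOn_go l (l.length + 1) [] [] (by omega)
  rcases hseg : pvSegs l with _ | ⟨h, r⟩
  · exact absurd hseg (pvSegs_ne_nil l)
  · rw [hseg] at this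
    simpa [PySem.Chars.splitOn, hseg] using this

theorem pv_replace_go (new : List Char) (l : List Char) : ∀ (fuel : Nat) (acc : List Char),
    l.length ≤ fuel →
    PySem.Chars.replace.go ['['] new fuel l acc =
      acc.reverse ++ l.flatMap (fun c => if c = '[' then new else [c]) := by
  induction l with
  | nil => intro fuel acc _; cases fuel <;> simp [PySem.Chars.replace.go]
  | cons c t ih =>
    intro fuel acc hle
    cases fuel with
    | zero => simp at hle
    | succ f =>
      have hle' : t.length ≤ f := by simpa using hle
      by_cases hc : c = '['
      · subst hc
        have h1 : PySem.Chars.replace.go ['['] new (f+1) ('['::t) acc =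
            PySem.Chars.replace.go ['['] new f t (new.reverse ++ acc) := by
          simp [PySem.Chars.replace.go, List.isPrefixOf]
        rw [h1, ih f (new.reverse ++ acc) hle']
        simp
      · have h1 : PySem.Chars.replace.go ['['] new (f+1) (c::t) acc =
            PySem.Chars.replace.go ['['] new f t (c :: acc) := by
          simp [PySem.Chars.replace.go, List.isPrefixOf]
          intro h; exact absurd h.symm hc
        rw [h1, ih f (c :: acc) hle']
        simp [hc]

theorem pv_replace_eq (pre : List Char) (l : List Char) :
    PySem.Chars.replace l ['['] (pre ++ ['{']) = pvRep pre l := by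
  simpa [PySem.Chars.replace, pvRep] using pv_replace_go (pre ++ ['{']) l l.length [] le_rfl

theorem pv_count_go (l : List Char) : ∀ (fuel : Nat) (acc : Nat),
    l.length ≤ fuel →
    PySem.Chars.count.go [','] fuel l acc = acc + l.count ',' := by
  induction l with
  | nil => intro fuel acc _; cases fuel <;> simp [PySem.Chars.count.go]
  | cons c t ih =>
    intro fuel acc hle
    cases fuel with
    | zero => simp at hle
    | succ f =>
      have hle' : t.length ≤ f := by simpa using hle
      by_cases hc : c = ','
      · subst hc
        have h1 : PySem.Chars.count.go [','] (f+1) (','::t) acc =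
            PySem.Chars.count.go [','] f t (acc + 1) := by
          simp [PySem.Chars.count.go, List.isPrefixOf]
        rw [h1, ih f (acc + 1) hle']
        simp [List.count_cons]
        omega
      · have h1 : PySem.Chars.count.go [','] (f+1) (c::t) acc =
            PySem.Chars.count.go [','] f t acc := by
          simp [PySem.Chars.count.go, List.isPrefixOf]
          intro h; exact absurd h.symm hc
        rw [h1, ih f acc hle']
        simp [List.count_cons, hc]

theorem pv_count_eq (l : List Char) : PySem.Chars.count l [','] = l.count ',' := by
  simpa [PySem.Chars.count] using pv_count_go l l.length 0 le_rfl

theorem pv_find_go_cons (c : Char) (t : List Char) (k : Nat) :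
    PySem.Chars.find.go ['['] (c :: t) k =
      if c = '[' then (k : Int) else PySem.Chars.find.go ['['] t (k + 1) := by
  by_cases hc : c = '['
  · subst hc; simp [PySem.Chars.find.go, List.isPrefixOf]
  · simp [PySem.Chars.find.go, List.isPrefixOf, hc]
    intro h; exact absurd h.symm hc

theorem pv_find_go_nil (k : Nat) : PySem.Chars.find.go ['['] [] k = -1 := by
  simp [PySem.Chars.find.go]

theorem pv_find_go_nonneg (l : List Char) : ∀ (k : Nat),
    PySem.Chars.find.go ['['] l k = -1 ∨ 0 ≤ PySem.Chars.find.go ['['] l k := by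
  induction l with
  | nil => intro k; left; exact pv_find_go_nil k
  | cons c t ih =>
    intro k
    rw [pv_find_go_cons]
    split_ifs
    · right; positivity
    · exact ih (k + 1)

theorem pv_find_go_shift (l : List Char) : ∀ (k : Nat),
    PySem.Chars.find.go ['['] l k =
      if PySem.Chars.find.go ['['] l 0 = -1 then -1
      else PySem.Chars.find.go ['['] l 0 + k := by
  induction l with
  | nil => intro k; simp [pv_find_go_nil]
  | cons c t ih =>
    intro k
    by_cases hc : c = '['
    · subst hc; simp [pv_find_go_cons]
    · rw [pv_find_go_cons, pv_find_go_cons, if_neg hc, if_neg hc, ih (k + 1), ih 1]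
      rcases pv_find_go_nonneg t 0 with h | h
      · simp [h]
      · split_ifs <;> push_cast <;> omega

theorem pv_commas_eq (part : List Char) :
    (if PySem.Chars.find part ['['] ≠ -1 then
        PySem.Chars.count (PySem.Chars.slice part (some (PySem.Chars.find part ['['] + 1)) none) [',']
      else 0) = pvCommas part := by
  induction part with
  | nil => simp [PySem.Chars.find, pv_find_go_nil, pvCommas]
  | cons c t ih =>
    by_cases hc : c = '['
    · subst hc
      have hf : PySem.Chars.find ('[' :: t) ['['] = 0 := by
        simp [PySem.Chars.find, pv_find_go_cons]
      rw [hf, if_pos (by decide : (0:Int) ≠ -1)]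
      have hsl : PySem.Chars.slice ('[' :: t) (some ((0:Int) + 1)) none = t := by
        rw [PySem.Chars.slice_eq_listSlice,
          PySem.List.slice_from _ (by norm_num : (0:Int) ≤ 0 + 1)]
        norm_num
      rw [hsl, pv_count_eq]
      simp [pvCommas]
    · have hf : PySem.Chars.find (c :: t) ['['] =
          if PySem.Chars.find t ['['] = -1 then -1 else PySem.Chars.find t ['['] + 1 := by
        simp only [PySem.Chars.find, pv_find_go_cons, if_neg hc]
        exact pv_find_go_shift t 1
      rcases pv_find_go_nonneg t 0 with h | h
      · have h0 : PySem.Chars.find t ['['] = -1 := by simpa [PySem.Chars.find] using h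
        rw [hf, if_pos h0]
        simp only [ne_eq, not_true_eq_false, if_false, pvCommas, if_neg hc]
        rw [← ih, if_neg (by simp [h0])]
      · have h0 : (0:Int) ≤ PySem.Chars.find t ['['] := by simpa [PySem.Chars.find] using h
        have h1 : PySem.Chars.find t ['['] ≠ -1 := by omega
        have h2 : PySem.Chars.find t ['['] + 1 ≠ -1 := by omega
        rw [hf, if_neg h1, if_pos h2]
        have hsl : PySem.Chars.slice (c :: t) (some (PySem.Chars.find t ['['] + 1 + 1)) none =
            PySem.Chars.slice t (some (PySem.Chars.find t ['['] + 1)) none := by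
          rw [PySem.Chars.slice_eq_listSlice, PySem.Chars.slice_eq_listSlice,
            PySem.List.slice_from _ (by omega : (0:Int) ≤ PySem.Chars.find t ['['] + 1 + 1),
            PySem.List.slice_from _ (by omega : (0:Int) ≤ PySem.Chars.find t ['['] + 1)]
          have h3 : (PySem.Chars.find t ['['] + 1 + 1).toNat
              = (PySem.Chars.find t ['['] + 1).toNat + 1 := by omega
          rw [h3, List.drop_succ_cons]
        rw [hsl]
        have hih := ih
        rw [if_pos h1] at hih
        rw [hih]
        simp [pvCommas, hc]

theorem pv_foldMid (l : List Char) : ∀ (s : List Char) (inb : Bool) (k : Int),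
    (l.foldl pvStepMid (s, inb, k)).1 = s ++ pvBody "(int[])".toList [] l inb k := by
  induction l with
  | nil => intro s inb k; simp [pvBody]
  | cons j t ih =>
    intro s inb k
    simp only [List.foldl_cons, pvStepMid, pvBody]
    split_ifs <;> simp [ih]

theorem pv_foldLast (l : List Char) : ∀ (s : List Char) (inb : Bool) (k : Int),
    (l.foldl pvStepLast (s, inb, k)).1 = s ++ pvBody "ialloc((int[])".toList [')'] l inb k := by
  induction l with
  | nil => intro s inb k; simp [pvBody]
  | cons j t ih =>
    intro s inb k
    simp only [List.foldl_cons, pvStepLast, pvBody]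
    split_ifs <;> simp [ih]

theorem pv_body_eq_convRef (pre close : List Char) (l : List Char) : ∀ (inb : Bool) (k : Int),
    pvBody pre close l inb k = pvConvRef pre close (pvSegs l) inb k := by
  induction l with
  | nil => intro inb k; simp [pvBody, pvSegs, pvConvRef, pvRep]
  | cons x t ih =>
    intro inb k
    rcases hseg : pvSegs t with _ | ⟨h, r⟩
    · exact absurd hseg (pvSegs_ne_nil t)
    by_cases hx : x = ']'
    · subst hx
      have hstep : pvSegs (']' :: t) = [] :: h :: r := by simp [pvSegs, hseg]
      rw [hstep]
      simp only [pvBody, if_neg (by decide : ¬(']' = '[')), if_pos rfl]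
      rw [ih false 0, hseg]
      simp [pvConvRef, pvRep, pvCnt]
    · have hstep : pvSegs (x :: t) = (x :: h) :: r := by simp [pvSegs, hx, hseg]
      rw [hstep]
      by_cases hb : x = '['
      · subst hb
        simp only [pvBody, if_pos rfl]
        rw [ih true k, hseg]
        cases r <;> simp [pvConvRef, pvRep, pvCnt]
      · by_cases hcm : x = ',' ∧ inb = true
        · simp only [pvBody, if_neg hb, if_neg hx, if_pos hcm]
          rw [ih inb (k+1), hseg]
          cases r <;> simp [pvConvRef, pvRep, pvCnt, hb, hcm.1, hcm.2]
        · simp only [pvBody, if_neg hb, if_neg hx, if_neg hcm]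
          rw [ih inb k, hseg]
          cases r <;> simp [pvConvRef, pvRep, pvCnt, hb, hcm]

theorem pv_cnt_true (l : List Char) : ∀ (k : Int), pvCnt l true k = k + (l.count ',' : Int) := by
  induction l with
  | nil => intro k; simp [pvCnt]
  | cons x t ih =>
    intro k
    by_cases hb : x = '['
    · subst hb
      simp only [pvCnt, if_pos rfl]
      rw [ih]
      simp [List.count_cons]
    · by_cases hx : x = ','
      · subst hx
        simp only [pvCnt, if_neg (by decide : ¬(',' = '[')),
          if_pos (⟨rfl, rfl⟩ : ',' = ',' ∧ (true:Bool) = true)]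
        rw [ih]
        simp [List.count_cons]
        push_cast
        ring
      · have hcount : (x :: t).count ',' = t.count ',' := by simp [List.count_cons, hx]
        simp only [pvCnt, if_neg hb, hcount]
        split_ifs with hcm
        · exact absurd hcm.1 hx
        · exact ih k

theorem pv_cnt_false (l : List Char) : pvCnt l false 0 = (pvCommas l : Int) := by
  induction l with
  | nil => simp [pvCnt, pvCommas]
  | cons x t ih =>
    by_cases hb : x = '['
    · subst hb
      simp only [pvCnt, if_pos rfl, pvCommas]
      rw [pv_cnt_true]
      simp
    · simp only [pvCnt, if_neg hb, if_neg (by simp : ¬(x = ',' ∧ (false:Bool) = true)), pvCommas,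
        if_neg hb]
      exact ih

theorem pv_join_nil (ls : List (List Char)) : PySem.Chars.join [] ls = ls.flatten := by
  induction ls with
  | nil => simp [PySem.Chars.join, List.intercalate]
  | cons h t ih =>
    cases t with
    | nil => simp [PySem.Chars.join, List.intercalate, List.intersperse]
    | cons q r =>
      simp only [PySem.Chars.join, List.intercalate] at ih ⊢
      simp [List.intersperse, ih, List.flatten_cons]

theorem pv_getD_neg_one {α : Type} (p : α) (t : List α) (d : α) :
    (PySem.List.pyGet? (p :: t) (-1)).getD d = (p :: t).getLastD d := by
  have h1 : PySem.List.pyIdx? (p :: t).length (-1) = some t.length := by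
    simp only [PySem.List.pyIdx?, List.length_cons]
    rw [if_neg (by omega), if_pos (by push_cast; omega)]
    norm_num
  simp only [PySem.List.pyGet?, h1, Option.bind_some]
  rw [List.getElem?_eq_getElem (by simp)]
  rw [List.getLastD_eq_getLast?, List.getLast?_eq_getElem?]
  simp [List.getElem?_eq_getElem]

theorem pv_join_convRef (pre close : List Char) (parts : List (List Char)) :
    PySem.Chars.join []
      (parts.dropLast.map (fun part =>
          pvRep pre part ++ ['}'] ++ close ++ ", ".toList
            ++ PySem.Int.toChars ((pvCommas part : Int) + 1))
        ++ [pvRep pre (parts.getLastD [])]) = pvConvRef pre close parts false 0 := by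
  induction parts with
  | nil => simp [pv_join_nil, pvConvRef, pvRep]
  | cons p rest ih =>
    cases rest with
    | nil => simp [pv_join_nil, pvConvRef]
    | cons q r =>
      have hlast : (p :: q :: r).getLastD [] = (q :: r).getLastD [] := by
        simp [List.getLastD_eq_getLast?]
      rw [List.dropLast_cons_of_ne_nil (by simp), List.map_cons, List.cons_append, pv_join_nil,
        List.flatten_cons, hlast, ← pv_join_nil, ih]
      simp [pvConvRef, pv_cnt_false]

theorem pv_convert_eq_convRef (pre close : List Char) (s : List Char) :
    pvConvert pre close s = pvConvRef pre close (pvSegs s) false 0 := by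
  rcases hseg : pvSegs s with _ | ⟨p, r⟩
  · exact absurd hseg (pvSegs_ne_nil s)
  simp only [pvConvert, pv_splitOn_eq, hseg, PySem.List.slice_to_neg_one,
    PySem.List.foldl_append_singleton_eq_map, List.nil_append, pv_getD_neg_one,
    pv_replace_eq, pv_commas_eq]
  rw [← hseg, ← pv_join_convRef pre close (pvSegs s), hseg]

theorem pv_string_mid (s : List Char) :
    (s.foldl pvStepMid ([], false, 0)).1 = pvConvert "(int[])".toList [] s := by
  rw [pv_foldMid, pv_convert_eq_convRef, pv_body_eq_convRef]; rfl

theorem pv_string_last (s : List Char) :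
    (s.foldl pvStepLast ([], false, 0)).1 = pvConvert "ialloc((int[])".toList [')'] s := by
  rw [pv_foldLast, pv_convert_eq_convRef, pv_body_eq_convRef]; rfl

-- ===== VERDICT (by name: the statement is the Claim_ definition above) =====
theorem format_all_inputs_spec : Claim_equal_format_all_inputs := by
  intro inputs _ _
  unfold Spec_format_all_inputs format_all_inputs format_all_inputs_alt
  simp only [PySem.List.foldl_append_singleton_eq_map, List.nil_append, pv_string_mid, pv_string_last]
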